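-- pv_equiv track=rewrite | github.com/ElDaniCarvajal/Reportes-Automaticos | reporte_unificado_total.py | compute_supported_unsupported_baseline
-- ===== SOURCE A (Python) =====
-- from typing import Dict, Any, Callable, Optional, List, Tuple
--
-- def d_norm(x: Any) -> str:
--     return (str(x) if x is not None else "").strip()
--
-- def d_count_top(items: List[str]) -> List[Tuple[str, int]]:
--     d_: Dict[str, int] = {}
--     for x in items:
--         x = d_norm(x) or "Unknown"
--         d_[x] = d_.get(x, 0) + 1
--     return sorted(d_.items(), key=lambda kv: kv[1], reverse=True)
--
-- def compute_supported_unsupported_baseline(windows_eps: List[Dict[str, Any]]) -> Tuple[int, int, str]: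
--     versions = [d_norm(c.get("connector_version")) for c in windows_eps if d_norm(c.get("connector_version"))]
--     if not versions:
--         return (0, 0, "no_connector_version")
--     counts = d_count_top(versions)
--     baseline = counts[0][0]
--     sup = 0
--     uns = 0
--     for c in windows_eps:
--         v = d_norm(c.get("connector_version"))
--         if not v:
--             continue
--         if v == baseline:
--             sup += 1
--         else:
--             uns += 1
--     return (sup, uns, baseline)
-- ===== SOURCE B (Python) =====
-- def d_norm(x):
--     return (str(x) if x is not None else "").strip()
--
-- def compute_supported_unsupported_baseline(windows_eps):
--     counts = {}
--     total = 0
--     for c in windows_eps: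
--         v = d_norm(c.get("connector_version"))
--         if v:
--             counts[v] = counts.get(v, 0) + 1
--             total += 1
--     if not counts:
--         return (0, 0, "no_connector_version")
--     baseline, sup = max(counts.items(), key=lambda kv: kv[1])
--     return (sup, total - sup, baseline)
-- ===== Notes on version B (the rewrite author's own statement) =====
-- stated objective: simpler
-- what changed: B builds the frequency table in a single pass and reads baseline and sup straight off it with max(items, key=count) (first maximal = A's stable-descending-sort tie-break), computing uns as total - sup, so A's sort and entire second re-scan of windows_eps disappear.
import Mathlib
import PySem

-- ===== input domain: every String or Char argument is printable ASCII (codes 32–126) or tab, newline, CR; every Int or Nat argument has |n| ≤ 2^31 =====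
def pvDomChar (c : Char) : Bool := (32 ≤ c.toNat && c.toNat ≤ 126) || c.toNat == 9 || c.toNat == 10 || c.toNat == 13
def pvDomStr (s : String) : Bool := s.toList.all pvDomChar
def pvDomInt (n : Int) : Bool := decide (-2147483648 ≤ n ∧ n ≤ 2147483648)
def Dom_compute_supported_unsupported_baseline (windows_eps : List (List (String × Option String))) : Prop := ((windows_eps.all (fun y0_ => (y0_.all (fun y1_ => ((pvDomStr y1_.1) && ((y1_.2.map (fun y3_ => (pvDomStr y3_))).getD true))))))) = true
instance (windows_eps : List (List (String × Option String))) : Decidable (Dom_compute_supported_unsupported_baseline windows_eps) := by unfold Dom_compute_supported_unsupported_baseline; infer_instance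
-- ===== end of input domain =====

-- B replaces A's stable descending sort plus second scan of windows_eps by a single counting pass:
-- baseline and sup come from max(counts.items(), key=count) (Python's max keeps the FIRST maximal item,
-- the same tie-break as the head of A's stable descending sort) and uns = total - sup. Objective: simpler.

-- ===== PORT A =====
-- d_norm(x) = (str(x) if x is not None else "").strip(); here x is Optional[str], so str(x) = x
def pv_dnorm (x : Option String) : String := PySem.Str.strip (x.getD "")

-- c.get("connector_version"): a missing key and a stored None both give Python None
def pv_cget (c : List (String × Option String)) : Option String :=
  ((PySem.Dict.mk c).get? "connector_version").join

def d_count_top (items : List String) : List (String × Int) :=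
  let d := items.foldl (fun d x =>
      let x' := if pv_dnorm (some x) = "" then "Unknown" else pv_dnorm (some x)
      d.insert x' (d.getD x' 0 + 1)) PySem.Dict.empty
  PySem.List.sorted d.items (fun kv => kv.2) true

def compute_supported_unsupported_baseline (windows_eps : List (List (String × Option String))) : Int × Int × String :=
  let versions := (windows_eps.map (fun c => pv_dnorm (pv_cget c))).filter (fun v => v ≠ "")
  if versions = [] then (0, 0, "no_connector_version")
  else
    match PySem.List.pyGet? (d_count_top versions) 0 with
    | none => (0, 0, "")  -- unreachable: counts is nonempty since versions ≠ [] (counts[0] cannot raise)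
    | some kv =>
      let p := windows_eps.foldl (fun (su : Int × Int) c =>
          let v := pv_dnorm (pv_cget c)
          if v = "" then su
          else if v = kv.1 then (su.1 + 1, su.2) else (su.1, su.2 + 1)) (0, 0)
      (p.1, p.2, kv.1)

-- ===== PORT B =====
def compute_supported_unsupported_baseline_alt (windows_eps : List (List (String × Option String))) : Int × Int × String :=
  let st := windows_eps.foldl (fun (st : PySem.Dict String Int × Int) c =>
      let v := pv_dnorm (pv_cget c)
      if v = "" then st
      else (st.1.insert v (st.1.getD v 0 + 1), st.2 + 1)) (PySem.Dict.empty, 0)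
  match PySem.List.max? st.1.items (fun kv => kv.2) with
  | none => (0, 0, "no_connector_version")  -- 'if not counts'
  | some kv => (kv.2, st.2 - kv.2, kv.1)

-- ===== PRECONDITION & SPEC =====
def Spec_compute_supported_unsupported_baseline (windows_eps : List (List (String × Option String))) (out : Int × Int × String) : Prop := out = compute_supported_unsupported_baseline_alt windows_eps
instance (windows_eps : List (List (String × Option String))) (out : Int × Int × String) : Decidable (Spec_compute_supported_unsupported_baseline windows_eps out) := by unfold Spec_compute_supported_unsupported_baseline; infer_instance

-- ===== CLAIM (what is proved, stated in full; the proofs are below) =====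
def Claim_equal_compute_supported_unsupported_baseline : Prop := ∀ (windows_eps : List (List (String × Option String))), Dom_compute_supported_unsupported_baseline windows_eps → Spec_compute_supported_unsupported_baseline windows_eps (compute_supported_unsupported_baseline windows_eps)

-- ===== LEMMAS AND PROOFS =====

lemma pv_chars_strip_idem (s : List Char) :
    PySem.Chars.strip (PySem.Chars.strip s) = PySem.Chars.strip s := by
  simp only [PySem.Chars.strip, PySem.Chars.lstrip, PySem.Chars.rstrip]
  set p := PySem.Chars.isspace with hp
  set l := List.dropWhile p s with hl
  set rl := (List.dropWhile p l.reverse).reverse with hrl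
  have hpre : rl <+: l := List.reverse_suffix.mp (by simpa [hrl] using List.dropWhile_suffix (l := l.reverse) p)
  have hself : List.dropWhile p rl = rl := by
    match h : rl with
    | [] => simp
    | a :: t =>
      have hlnil : l ≠ [] := by
        rintro h2; rw [h2] at hpre; simp at hpre
      have hhead : a = l.head hlnil := by
        have h3 := List.IsPrefix.head hpre (by simp)
        simp only [List.head_cons] at h3
        exact h3
      have hpa : p a = false := by
        rw [hhead]
        exact List.head_dropWhile_not p hlnil
      simp [hpa]
  rw [hself, hrl]
  simp [List.dropWhile_idempotent]

lemma pv_strip_idem (s : String) :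
    PySem.Str.strip (PySem.Str.strip s) = PySem.Str.strip s := by
  simp [PySem.Str.strip, pv_chars_strip_idem]

-- head of one insertBy step with the reverse comparator is exactly one max? step
lemma pv_head_insertBy {α κ : Type} [LinearOrder κ] (key : α → κ) (x : α) (s : List α) :
    (PySem.List.insertBy (fun a b => decide (key b < key a)) x s).head? =
      some (match s.head? with
            | none => x
            | some m => if key m < key x then x else m) := by
  cases s with
  | nil => simp [PySem.List.insertBy]
  | cons y ys =>
    simp only [PySem.List.insertBy, List.head?]
    by_cases h : key y < key x <;> simp [h]

lemma pv_head_foldl_insertBy {α κ : Type} [LinearOrder κ] (key : α → κ) :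
    ∀ (xs : List α) (s : List α) (m : Option α), s.head? = m →
      (xs.foldl (fun acc x => PySem.List.insertBy (fun a b => decide (key b < key a)) x acc) s).head? =
        xs.foldl (fun acc x =>
          match acc with
          | none => some x
          | some mm => if key mm < key x then some x else some mm) m
  | [], s, m, h => by simpa using h
  | x :: xs, s, m, h => by
    simp only [List.foldl]
    refine pv_head_foldl_insertBy key xs _ _ ?_
    rw [pv_head_insertBy, ← h]
    cases s with
    | nil => simp
    | cons y ys => by_cases hc : key y < key x <;> simp [hc]

-- the head of Python's stable descending sort = Python's max (FIRST maximal element)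
lemma pv_head_sorted_rev {α κ : Type} [LinearOrder κ] (xs : List α) (key : α → κ) :
    (PySem.List.sorted xs key true).head? = PySem.List.max? xs key := by
  rw [PySem.List.sorted_rev_eq_foldl_insertBy]
  exact pv_head_foldl_insertBy key xs [] none rfl

lemma pv_pyGet_zero {α : Type} (l : List α) : PySem.List.pyGet? l 0 = l.head? := by
  cases l <;> simp [PySem.List.pyGet?, PySem.List.pyIdx?]

-- B's single pass, characterised over the A-side 'versions' list
lemma pv_b_fold (l : List (List (String × Option String))) :
    ∀ (d : PySem.Dict String Int) (n : Int),
      l.foldl (fun (st : PySem.Dict String Int × Int) c =>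
          let v := pv_dnorm (pv_cget c)
          if v = "" then st
          else (st.1.insert v (st.1.getD v 0 + 1), st.2 + 1)) (d, n) =
      (((l.map (fun c => pv_dnorm (pv_cget c))).filter (fun v => v ≠ "")).foldl
          (fun d x => d.insert x (d.getD x 0 + 1)) d,
        n + ((l.map (fun c => pv_dnorm (pv_cget c))).filter (fun v => v ≠ "")).length) := by
  induction l with
  | nil => intro d n; simp
  | cons c t ih =>
    intro d n
    simp only [List.foldl_cons, List.map_cons]
    by_cases h : pv_dnorm (pv_cget c) = ""
    · simpa [h] using ih d n
    · rw [List.filter_cons_of_pos (by simp [h])]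
      simp only [if_neg h]
      rw [ih]
      simp only [List.foldl_cons, List.length_cons, Prod.mk.injEq, true_and]
      push_cast
      ring

-- A's second scan, characterised over 'versions'
lemma pv_a_loop (l : List (List (String × Option String))) (b : String) :
    ∀ (s u : Int),
      l.foldl (fun (su : Int × Int) c =>
          let v := pv_dnorm (pv_cget c)
          if v = "" then su
          else if v = b then (su.1 + 1, su.2) else (su.1, su.2 + 1)) (s, u) =
      (s + (((l.map (fun c => pv_dnorm (pv_cget c))).filter (fun v => v ≠ "")).count b : Int),
       u + (((l.map (fun c => pv_dnorm (pv_cget c))).filter (fun v => v ≠ "")).countP (fun v => !(v == b)) : Int)) := by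
  induction l with
  | nil => intro s u; simp
  | cons c t ih =>
    intro s u
    simp only [List.foldl_cons, List.map_cons]
    by_cases h : pv_dnorm (pv_cget c) = ""
    · simpa [h] using ih s u
    · rw [List.filter_cons_of_pos (by simp [h])]
      by_cases hb : pv_dnorm (pv_cget c) = b
      · simp only [if_neg h, if_pos hb]
        rw [ih]
        rw [hb, List.count_cons_self]
        simp only [List.countP_cons, beq_self_eq_true, Bool.not_true, Prod.mk.injEq]
        constructor <;> push_cast <;> ring
      · simp only [if_neg h, if_neg hb]
        rw [ih]
        rw [List.count_cons_of_ne (by exact fun e => hb e)]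
        rw [List.countP_cons]
        have hbf : (pv_dnorm (pv_cget c) == b) = false := by simpa using hb
        simp only [hbf, Bool.not_false, Prod.mk.injEq]
        constructor <;> push_cast <;> ring

-- A's dict in d_count_top over 'versions' (every element stripped and nonempty) is the plain counter
lemma pv_a_dict (vs : List String) (h : ∀ x ∈ vs, PySem.Str.strip x = x ∧ x ≠ "") :
    vs.foldl (fun d x =>
        let x' := if pv_dnorm (some x) = "" then "Unknown" else pv_dnorm (some x)
        d.insert x' (d.getD x' 0 + 1)) PySem.Dict.empty = PySem.Dict.counter vs := by
  rw [← PySem.Dict.foldl_insert_getD_add_one_eq_counter]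
  apply PySem.List.foldl_congr_mem
  intro acc x hx
  obtain ⟨h1, h2⟩ := h x hx
  simp [pv_dnorm, h1, h2]

lemma pv_mem_items_counter (vs : List String) (kv : String × Int)
    (h : kv ∈ (PySem.Dict.counter vs).items) : kv.2 = (vs.count kv.1 : Int) := by
  rw [PySem.Dict.items_counter] at h
  obtain ⟨k, _, rfl⟩ := List.mem_map.mp h
  rfl

lemma pv_main (w : List (List (String × Option String))) :
    compute_supported_unsupported_baseline w = compute_supported_unsupported_baseline_alt w := by
  unfold compute_supported_unsupported_baseline compute_supported_unsupported_baseline_alt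
  rw [pv_b_fold]
  set vs := (w.map (fun c => pv_dnorm (pv_cget c))).filter (fun v => v ≠ "") with hvs
  have hmem : ∀ x ∈ vs, PySem.Str.strip x = x ∧ x ≠ "" := by
    intro x hx
    rw [hvs] at hx
    obtain ⟨hmap, hne⟩ := List.mem_filter.mp hx
    obtain ⟨c, _, rfl⟩ := List.mem_map.mp hmap
    refine ⟨pv_strip_idem _, by simpa using hne⟩
  have hc : List.foldl (fun d x => d.insert x (d.getD x 0 + 1)) PySem.Dict.empty vs = PySem.Dict.counter vs :=
    PySem.Dict.foldl_insert_getD_add_one_eq_counter vs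
  by_cases hnil : vs = []
  · rw [if_pos hnil, hnil]
    rfl
  · rw [if_neg hnil]
    unfold d_count_top
    rw [pv_a_dict vs hmem, pv_pyGet_zero, pv_head_sorted_rev, hc]
    cases ho : PySem.List.max? (PySem.Dict.counter vs).items (fun kv => kv.2) with
    | none =>
      exfalso
      rw [PySem.List.max?_eq_none_iff, PySem.Dict.items_counter] at ho
      rcases vs with _ | ⟨x, t⟩
      · exact hnil rfl
      · have hxm : x ∈ PySem.Set.ofList (x :: t) := by
          rw [PySem.Set.mem_ofList]; simp
        rw [List.map_eq_nil_iff] at ho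
        rw [ho] at hxm; simp at hxm
    | some kv =>
      dsimp only
      rw [ho]
      dsimp only
      rw [pv_a_loop w kv.1]
      have hkv : kv.2 = (vs.count kv.1 : Int) :=
        pv_mem_items_counter vs kv (PySem.List.max?_mem ho)
      have hlen : vs.length = vs.countP (fun v => v == kv.1) + vs.countP (fun v => !(v == kv.1)) := by
        have h0 := List.length_eq_countP_add_countP (p := fun v => (v == kv.1) = true) (l := vs)
        simpa [decide_not] using h0
      have hcnt : vs.count kv.1 = vs.countP (fun v => v == kv.1) := rfl
      refine Prod.ext ?_ (Prod.ext ?_ rfl)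
      · show (0 : Int) + (vs.count kv.1 : Int) = kv.2
        rw [hkv]; ring
      · show (0 : Int) + (vs.countP (fun v => !(v == kv.1)) : Int) = 0 + (vs.length : Int) - kv.2
        rw [hkv, hcnt]
        push_cast [hlen]
        ring

-- ===== VERDICT (by name: the statement is the Claim_ definition above) =====
theorem compute_supported_unsupported_baseline_spec : Claim_equal_compute_supported_unsupported_baseline := by
  intro w _
  unfold Spec_compute_supported_unsupported_baseline
  exact pv_main w
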